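-- pv_equiv track=rewrite | github.com/HarveyPost/Intro-to-Programming | Coursework/cwk1.py | valid_char_in_string
-- ===== SOURCE A (Python) =====
-- def valid_char_in_string(popList: list, charSet: list) -> bool:
--     # Check if popList and charSet are lists
--     if not isinstance(popList, list) or not isinstance(charSet, list):
--         return False
--     # Create a shallow copy of charSet
--     valid_chars = charSet[:]
--     # Iterate through each character in each list and check if it is in charSet
--     for string in popList:
--         for char in string:
--             if char not in valid_chars:
--                 return False
--     return True
-- ===== SOURCE B (Python) =====
-- def valid_char_in_string(popList: list, charSet: list) -> bool:
--     if not isinstance(popList, list) or not isinstance(charSet, list):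
--         return False
--     need = sorted({c for s in popList for c in s})
--     allowed = sorted(set(charSet))
--     i = j = 0
--     while i < len(need):
--         if j == len(allowed):
--             return False
--         if allowed[j] < need[i]:
--             j += 1
--         elif allowed[j] == need[i]:
--             i += 1
--         else:
--             return False
--     return True
-- ===== Notes on version B (the rewrite author's own statement) =====
-- stated objective: alternative
-- what changed: Replaces the nested per-character membership scan with a sort-then-merge algorithm: the distinct input characters and the distinct charset entries are each sorted once, then a single two-pointer merge sweep checks that every needed character occurs in the allowed sequence.
import Mathlib
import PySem

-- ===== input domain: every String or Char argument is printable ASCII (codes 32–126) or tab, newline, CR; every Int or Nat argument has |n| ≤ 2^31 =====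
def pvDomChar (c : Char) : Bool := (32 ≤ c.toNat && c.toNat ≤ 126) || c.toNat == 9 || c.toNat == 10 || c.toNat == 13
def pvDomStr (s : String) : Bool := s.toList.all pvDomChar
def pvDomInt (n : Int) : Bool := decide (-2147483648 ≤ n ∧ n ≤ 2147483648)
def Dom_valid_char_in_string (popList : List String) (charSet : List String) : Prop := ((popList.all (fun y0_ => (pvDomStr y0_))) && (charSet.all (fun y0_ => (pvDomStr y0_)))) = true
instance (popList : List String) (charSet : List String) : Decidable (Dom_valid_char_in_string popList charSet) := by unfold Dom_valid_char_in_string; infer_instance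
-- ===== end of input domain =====

-- ===== PORT A =====
-- B sorts the distinct input characters and the distinct charset entries once and checks coverage by a single two-pointer merge sweep; alternative algorithm, same result.
def valid_char_in_string (popList : List String) (charSet : List String) : Bool :=
  let valid_chars := PySem.List.slice charSet none none
  popList.all (fun string =>
    string.toList.all (fun ch => valid_chars.contains (String.mk [ch])))

-- ===== PORT B =====
-- the while loop of Source B: index i walks the sorted distinct needed chars, j the sorted distinct allowed strings
def vcisMergeLoop (need allowed : List String) (i j : Nat) : Bool :=
  if hi : i < need.length then
    if hj : j < allowed.length then
      if allowed[j] < need[i] then vcisMergeLoop need allowed i (j + 1)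
      else if allowed[j] == need[i] then vcisMergeLoop need allowed (i + 1) j
      else false
    else false
  else true
termination_by (need.length - i) + (allowed.length - j)

def valid_char_in_string_alt (popList : List String) (charSet : List String) : Bool :=
  let need := PySem.List.sorted
    (PySem.Set.ofList (popList.flatMap (fun s => s.toList.map (fun ch => String.mk [ch]))))
    (fun x => x) false
  let allowed := PySem.List.sorted (PySem.Set.ofList charSet) (fun x => x) false
  vcisMergeLoop need allowed 0 0

-- ===== PRECONDITION & SPEC =====
def Spec_valid_char_in_string (popList : List String) (charSet : List String) (out : Bool) : Prop := out = valid_char_in_string_alt popList charSet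
instance (popList : List String) (charSet : List String) (out : Bool) : Decidable (Spec_valid_char_in_string popList charSet out) := by unfold Spec_valid_char_in_string; infer_instance

-- ===== CLAIM (what is proved, stated in full; the proofs are below) =====
def Claim_equal_valid_char_in_string : Prop := ∀ (popList : List String) (charSet : List String), Dom_valid_char_in_string popList charSet → Spec_valid_char_in_string popList charSet (valid_char_in_string popList charSet)

-- ===== LEMMAS AND PROOFS =====

-- proof-only list form of the merge sweep (head views of the two index suffixes)
def vcisMergeL : List String → List String → Bool
  | [], _ => true
  | _ :: _, [] => false
  | n :: ns, a :: as =>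
      if a < n then vcisMergeL (n :: ns) as
      else if a == n then vcisMergeL ns (a :: as)
      else false
termination_by xs ys => xs.length + ys.length


theorem vcisMergeL_nil (ys : List String) : vcisMergeL [] ys = true := by
  rw [vcisMergeL.eq_def]

theorem vcisMergeL_cons_nil (n : String) (ns : List String) : vcisMergeL (n :: ns) [] = false := by
  rw [vcisMergeL.eq_def]

theorem vcisMergeL_cons_cons (n a : String) (ns as : List String) :
    vcisMergeL (n :: ns) (a :: as) =
      if a < n then vcisMergeL (n :: ns) as
      else if a == n then vcisMergeL ns (a :: as) else false := by
  rw [vcisMergeL.eq_def]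

theorem vcisMergeLoop_eq_mergeL (need allowed : List String) (i j : Nat) :
    vcisMergeLoop need allowed i j = vcisMergeL (need.drop i) (allowed.drop j) := by
  fun_induction vcisMergeLoop need allowed i j with
  | case1 i j hi hj hlt ih =>
      rw [List.drop_eq_getElem_cons hi, List.drop_eq_getElem_cons hj, vcisMergeL_cons_cons]
      simp only [hlt, if_pos]
      rw [← List.drop_eq_getElem_cons hi]
      exact ih
  | case2 i j hi hj hlt heq ih =>
      rw [List.drop_eq_getElem_cons hi, List.drop_eq_getElem_cons hj, vcisMergeL_cons_cons]
      simp only [hlt, heq, if_pos, ite_false]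
      rw [← List.drop_eq_getElem_cons hj]
      exact ih
  | case3 i j hi hj hlt heq =>
      rw [List.drop_eq_getElem_cons hi, List.drop_eq_getElem_cons hj, vcisMergeL_cons_cons]
      simp [hlt, heq]
  | case4 i j hi hj =>
      rw [List.drop_eq_nil_of_le (show allowed.length ≤ j by omega),
        List.drop_eq_getElem_cons hi, vcisMergeL_cons_nil]
  | case5 i j hi =>
      rw [List.drop_eq_nil_of_le (show need.length ≤ i by omega), vcisMergeL_nil]

theorem vcisMergeL_spec : ∀ xs ys : List String, xs.Pairwise (· < ·) → ys.Pairwise (· < ·) →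
    (vcisMergeL xs ys = true ↔ ∀ x ∈ xs, x ∈ ys) := by
  intro xs ys
  fun_induction vcisMergeL xs ys with
  | case1 ys =>
      intro _ _
      simp
  | case2 n ns =>
      intro _ _
      constructor
      · intro h; exact absurd h (by simp)
      · intro h; simpa using h n (by simp)
  | case3 n ns a as hlt ih =>
      intro hxs hys
      rw [ih hxs hys.tail]
      constructor
      · intro h x hx
        exact List.mem_cons_of_mem a (h x hx)
      · intro h x hx
        rcases List.mem_cons.mp (h x hx) with h' | h'
        · exfalso
          have hax : a < x := by
            rcases List.mem_cons.mp hx with rfl | hx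
            · exact hlt
            · exact lt_trans hlt (List.rel_of_pairwise_cons hxs hx)
          exact absurd h' (ne_of_gt hax)
        · exact h'
  | case4 n ns a as hlt heq ih =>
      intro hxs hys
      have ha : a = n := by simpa using heq
      rw [ih hxs.tail hys]
      subst ha
      constructor
      · intro h x hx
        rcases List.mem_cons.mp hx with rfl | hx
        · exact List.mem_cons_self
        · exact h x hx
      · intro h x hx
        exact h x (List.mem_cons_of_mem _ hx)
  | case5 n ns a as hlt heq =>
      intro hxs hys
      have hna : n < a := by
        rcases lt_trichotomy a n with h | h | h
        · exact absurd h hlt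
        · exact absurd h (by simpa using heq)
        · exact h
      constructor
      · intro h; exact absurd h (by simp)
      · intro h
        exfalso
        rcases List.mem_cons.mp (h n (by simp)) with h' | h'
        · exact absurd h' (ne_of_lt hna)
        · exact absurd (lt_trans hna (List.rel_of_pairwise_cons hys h')) (lt_irrefl n)

-- ===== VERDICT (by name: the statement is the Claim_ definition above) =====
theorem valid_char_in_string_spec : Claim_equal_valid_char_in_string := by
  intro popList charSet _
  unfold Spec_valid_char_in_string valid_char_in_string valid_char_in_string_alt
  rw [Bool.eq_iff_iff, vcisMergeLoop_eq_mergeL]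
  simp only [List.drop_zero]
  rw [vcisMergeL_spec _ _ (PySem.List.sorted_ofList_pairwise_lt _)
    (PySem.List.sorted_ofList_pairwise_lt _)]
  simp only [PySem.List.slice_none_none, List.all_eq_true, List.contains_iff_mem,
    PySem.List.mem_sorted, PySem.Set.mem_ofList, List.mem_flatMap, List.mem_map]
  constructor
  · rintro h x ⟨s, hs, ch, hch, rfl⟩; exact h s hs ch hch
  · intro h s hs ch hch; exact h _ ⟨s, hs, ch, hch, rfl⟩
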